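-- pv_equiv track=rewrite | github.com/PavelShpagin/AQUA | judges/edit/agent_v2.py | _parse_critic
-- ===== SOURCE A (Python) =====
-- from typing import Any, Dict, Tuple, Optional, List
--
-- ALLOWED = {"TP", "FP1", "FP2", "FP3", "TN", "FN"}
--
-- def _parse_critic(text: str) -> Tuple[str, str, str]:
--     s = (text or "").strip()
--     decision = ""
--     label = ""
--     reason = ""
--     for line in s.splitlines():
--         u = line.upper()
--         if u.startswith("DECISION:"):
--             decision = line.split(":", 1)[1].strip().upper()
--         elif u.startswith("LABEL:"):
--             label = line.split(":", 1)[1].strip().upper()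
--         elif u.startswith("REASON:"):
--             reason = line.split(":", 1)[1].strip()
--     if decision not in {"CONFIRM", "CHANGE"}:
--         decision = "CONFIRM"
--     if label not in ALLOWED:
--         label = ""
--     if not reason:
--         reason = (s[:240] if s else "No critic reason")
--     return decision, label, reason
-- ===== SOURCE B (Python) =====
-- ALLOWED = {"TP", "FP1", "FP2", "FP3", "TN", "FN"}
--
-- def _parse_critic(text):
--     s = (text or "").strip()
--     fields = {}
--     for line in s.splitlines():
--         if ":" in line:
--             key, value = line.split(":", 1)
--             fields[key.upper()] = value.strip()
--     decision = fields.get("DECISION", "").upper()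
--     label = fields.get("LABEL", "").upper()
--     reason = fields.get("REASON", "")
--     if decision not in {"CONFIRM", "CHANGE"}:
--         decision = "CONFIRM"
--     if label not in ALLOWED:
--         label = ""
--     if not reason:
--         reason = s[:240] if s else "No critic reason"
--     return decision, label, reason
-- ===== Notes on version B (the rewrite author's own statement) =====
-- stated objective: alternative
-- what changed: B replaces A's three per-line prefix-test branches by a single pass that indexes every line containing a colon in a dict keyed by the uppercased text before the first colon (later lines overwrite earlier ones) and reads the DECISION, LABEL and REASON fields from that index after the loop, applying the same normalization.
import Mathlib
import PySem

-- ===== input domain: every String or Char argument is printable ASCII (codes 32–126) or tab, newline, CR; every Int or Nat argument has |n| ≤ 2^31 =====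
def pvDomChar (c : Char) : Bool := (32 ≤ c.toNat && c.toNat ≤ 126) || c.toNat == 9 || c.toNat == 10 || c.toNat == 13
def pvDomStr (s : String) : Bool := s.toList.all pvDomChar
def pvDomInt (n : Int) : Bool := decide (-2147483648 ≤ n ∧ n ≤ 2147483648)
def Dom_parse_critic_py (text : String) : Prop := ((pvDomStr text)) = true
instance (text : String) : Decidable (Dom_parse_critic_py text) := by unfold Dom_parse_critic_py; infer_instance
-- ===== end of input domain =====

-- B replaces A's three in-loop prefix branches by a single pass that indexes every "key: value"
-- line in a dict (last occurrence wins) and reads the three fields afterwards (objective: alternative decomposition).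

-- ===== PORT A =====
def pvALLOWED : List String := ["TP", "FP1", "FP2", "FP3", "TN", "FN"]

-- loop body of A: the three elif branches; line.split(":", 1)[1] is ported with getD — inside a
-- matched branch the line contains ':' so the split has exactly two pieces and index 1 exists
def pvAStep (st : String × String × String) (line : String) : String × String × String :=
  let u := PySem.Str.upper line
  if PySem.Str.startswith u "DECISION:" then
    (PySem.Str.upper (PySem.Str.strip (((PySem.Str.splitMax? line ":" 1).getD []).getD 1 "")), st.2.1, st.2.2)
  else if PySem.Str.startswith u "LABEL:" then
    (st.1, PySem.Str.upper (PySem.Str.strip (((PySem.Str.splitMax? line ":" 1).getD []).getD 1 "")), st.2.2)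
  else if PySem.Str.startswith u "REASON:" then
    (st.1, st.2.1, PySem.Str.strip (((PySem.Str.splitMax? line ":" 1).getD []).getD 1 ""))
  else st

-- A's trailing normalization of the three accumulated fields
def pvAFinish (s : String) (st : String × String × String) : String × String × String :=
  (if ¬ (st.1 = "CONFIRM" ∨ st.1 = "CHANGE") then "CONFIRM" else st.1,
   if ¬ (st.2.1 ∈ pvALLOWED) then "" else st.2.1,
   if st.2.2 = "" then (if s ≠ "" then PySem.Str.slice s none (some 240) else "No critic reason") else st.2.2)

def parse_critic_py (text : String) : String × String × String :=
  pvAFinish (PySem.Str.strip (if text ≠ "" then text else ""))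
    ((PySem.Str.splitlines (PySem.Str.strip (if text ≠ "" then text else ""))).foldl pvAStep ("", "", ""))

-- ===== PORT B =====
-- loop body of B: index the line under its (uppercased) key if it contains ':'
def pvBStep (d : PySem.Dict String String) (line : String) : PySem.Dict String String :=
  if PySem.Str.isIn ":" line then
    let parts := (PySem.Str.splitMax? line ":" 1).getD []
    d.insert (PySem.Str.upper (parts.getD 0 "")) (PySem.Str.strip (parts.getD 1 ""))
  else d

def pvALLOWED_alt : List String := ["TP", "FP1", "FP2", "FP3", "TN", "FN"]

-- B's field extraction from the built index, with the same trailing normalization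
def pvBFinish (s : String) (fields : PySem.Dict String String) : String × String × String :=
  (if ¬ (PySem.Str.upper (fields.getD "DECISION" "") = "CONFIRM" ∨ PySem.Str.upper (fields.getD "DECISION" "") = "CHANGE")
     then "CONFIRM" else PySem.Str.upper (fields.getD "DECISION" ""),
   if ¬ (PySem.Str.upper (fields.getD "LABEL" "") ∈ pvALLOWED_alt) then "" else PySem.Str.upper (fields.getD "LABEL" ""),
   if fields.getD "REASON" "" = "" then (if s ≠ "" then PySem.Str.slice s none (some 240) else "No critic reason")
     else fields.getD "REASON" "")

def parse_critic_py_alt (text : String) : String × String × String :=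
  pvBFinish (PySem.Str.strip (if text ≠ "" then text else ""))
    ((PySem.Str.splitlines (PySem.Str.strip (if text ≠ "" then text else ""))).foldl pvBStep PySem.Dict.empty)

-- ===== PRECONDITION & SPEC =====
def Spec_parse_critic_py (text : String) (out : String × String × String) : Prop := out = parse_critic_py_alt text
instance (text : String) (out : String × String × String) : Decidable (Spec_parse_critic_py text out) := by unfold Spec_parse_critic_py; infer_instance

-- ===== CLAIM (what is proved, stated in full; the proofs are below) =====
def Claim_equal_parse_critic_py : Prop := ∀ (text : String), Dom_parse_critic_py text → Spec_parse_critic_py text (parse_critic_py text)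

-- ===== LEMMAS AND PROOFS =====

lemma pv_upperChar_eq_colon (c : Char) : PySem.Chars.upperChar c = ':' ↔ c = ':' := by
  constructor
  · intro h
    by_cases hl : PySem.Chars.islower c = true
    · exfalso
      simp only [PySem.Chars.upperChar, hl, if_true] at h
      have hb : 97 ≤ c.toNat ∧ c.toNat ≤ 122 := by
        simpa [PySem.Chars.islower, Char.le_def] using hl
      have hv : Nat.isValidChar (c.toNat - 32) := Or.inl (by omega)
      have h' := congrArg Char.toNat h
      rw [Char.toNat_ofNat, if_pos hv] at h'
      have : (':'.toNat : Nat) = 58 := by decide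
      omega
    · simp only [PySem.Chars.upperChar, hl] at h
      simpa using h
  · intro h; subst h; decide

lemma pv_go0 (fuel : Nat) (l cur : List Char) (acc : List (List Char)) :
    PySem.Chars.splitOnMax.go [':'] fuel 0 l cur acc = ((cur.reverse ++ l) :: acc).reverse := by
  cases fuel with
  | zero => rw [PySem.Chars.splitOnMax.go]
  | succ n =>
    cases l with
    | nil => rw [PySem.Chars.splitOnMax.go] <;> simp
    | cons c rest => rw [PySem.Chars.splitOnMax.go]; simp

lemma pv_go1 (l : List Char) (fuel : Nat) (cur : List Char) (acc : List (List Char))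
    (h : l.length < fuel) :
    PySem.Chars.splitOnMax.go [':'] fuel 1 l cur acc =
      if ':' ∈ l then
        acc.reverse ++ [cur.reverse ++ l.takeWhile (· ≠ ':'), (l.dropWhile (· ≠ ':')).tail]
      else acc.reverse ++ [cur.reverse ++ l] := by
  induction l generalizing fuel cur acc with
  | nil =>
    cases fuel with
    | zero => omega
    | succ n => rw [PySem.Chars.splitOnMax.go] <;> simp
  | cons c rest ih =>
    cases fuel with
    | zero => omega
    | succ n =>
      rw [PySem.Chars.splitOnMax.go]
      by_cases hc : c = ':'
      · subst hc
        simp only [List.isPrefixOf]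
        simp [pv_go0]
      · have hpre : ([':'] : List Char).isPrefixOf (c :: rest) = false := by
          simp [List.isPrefixOf]
          exact fun h' => hc h'.symm
        simp only [hpre, if_neg (by omega : ¬ (1 = 0))]
        rw [ih n (c :: cur) acc (by simpa using Nat.lt_of_succ_lt_succ h)]
        simp [hc, Ne.symm hc]

lemma pv_parts (line : String) :
    ((PySem.Str.splitMax? line ":" 1).getD []) =
      if ':' ∈ line.toList then
        [String.ofList (line.toList.takeWhile (· ≠ ':')),
         String.ofList ((line.toList.dropWhile (· ≠ ':')).tail)]
      else [String.ofList line.toList] := by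
  have h1 : PySem.Chars.splitOnMax line.toList [':'] 1 =
      if ':' ∈ line.toList then
        [line.toList.takeWhile (· ≠ ':'), (line.toList.dropWhile (· ≠ ':')).tail]
      else [line.toList] := by
    rw [PySem.Chars.splitOnMax]
    rw [if_neg (by omega : ¬ (1 : Int) < 0), show (Int.toNat 1) = 1 from rfl]
    rw [pv_go1 _ _ _ _ (by omega)]
    simp
  simp only [PySem.Str.splitMax?]
  rw [show (":" : String).toList = [':'] from by decide]
  simp only [PySem.Chars.splitMax?]
  rw [if_neg (by decide)]
  rw [h1]
  split_ifs <;> simp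

lemma pv_key (K : List Char) (l : List Char) (hK : ':' ∉ K) :
    (PySem.Chars.startswith (PySem.Chars.upper l) (K ++ [':']) = true) ↔
      (':' ∈ l ∧ PySem.Chars.upper (l.takeWhile (· ≠ ':')) = K) := by
  have hucolon : PySem.Chars.upperChar ':' = ':' := by decide
  induction l generalizing K with
  | nil => simp [PySem.Chars.startswith, PySem.Chars.upper]
  | cons c rest ih =>
    simp only [PySem.Chars.startswith, PySem.Chars.upper, List.map] at *
    by_cases hc : c = ':'
    · subst hc
      rw [List.takeWhile_cons_of_neg (by simp)]
      cases K with
      | nil =>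
        simp [List.isPrefixOf, hucolon]
      | cons k K' =>
        have hk : k ≠ ':' := fun h => hK (h ▸ List.mem_cons_self ..)
        simp only [List.cons_append, List.isPrefixOf, Bool.and_eq_true, beq_iff_eq, hucolon]
        constructor
        · rintro ⟨h1, -⟩; exact absurd h1 hk
        · rintro ⟨-, h2⟩; simp at h2
    · rw [List.takeWhile_cons_of_pos (by simp [hc])]
      cases K with
      | nil =>
        simp only [List.nil_append, List.isPrefixOf, Bool.and_eq_true,
          and_true, beq_iff_eq, List.map, List.mem_cons]
        have hcc : (':' = PySem.Chars.upperChar c) ↔ False := by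
          rw [eq_comm, pv_upperChar_eq_colon]; simp [hc]
        simp [hcc]
      | cons k K' =>
        have hk : k ≠ ':' := fun h => hK (h ▸ List.mem_cons_self ..)
        have hK' : ':' ∉ K' := fun h => hK (List.mem_cons_of_mem _ h)
        simp only [List.cons_append, List.isPrefixOf, Bool.and_eq_true, beq_iff_eq,
          List.map, List.mem_cons, List.cons.injEq]
        constructor
        · rintro ⟨h1, h2⟩
          obtain ⟨hmem, htw⟩ := (ih K' hK').mp h2
          exact ⟨Or.inr hmem, h1.symm, htw⟩
        · rintro ⟨h1, h2, h3⟩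
          have hmem : ':' ∈ rest := h1.resolve_left (fun h => hc h.symm)
          exact ⟨h2.symm, (ih K' hK').mpr ⟨hmem, h3⟩⟩

lemma pv_isIn_colon (line : String) : PySem.Str.isIn ":" line = true ↔ ':' ∈ line.toList := by
  rw [PySem.Str.isIn]
  rw [show (":" : String).toList = [':'] from by decide, PySem.Chars.isIn_iff_infix]
  exact List.singleton_infix_iff ':' line.toList

-- A's branch test ≡ "line has a colon and B's computed key equals K"
lemma pv_cond (line P K : String) (hK : ':' ∉ K.toList) (hP : P.toList = K.toList ++ [':']) :
    (PySem.Str.startswith (PySem.Str.upper line) P = true) ↔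
      (PySem.Str.isIn ":" line = true ∧
        PySem.Str.upper ((((PySem.Str.splitMax? line ":" 1).getD []).getD 0 "")) = K) := by
  rw [PySem.Str.startswith, PySem.Str.toList_upper, hP, pv_key K.toList line.toList hK,
    pv_isIn_colon]
  refine and_congr_right fun hmem => ?_
  rw [pv_parts, if_pos hmem]
  simp only [List.getD_cons_zero]
  rw [PySem.Str.upper, String.toList_ofList, String.ofList_eq]


-- one loop iteration preserves the invariant "A's three accumulators are B's three dict reads"
lemma pv_step (d : PySem.Dict String String) (dec lab rea : String) (line : String)
    (h1 : dec = PySem.Str.upper (d.getD "DECISION" ""))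
    (h2 : lab = PySem.Str.upper (d.getD "LABEL" ""))
    (h3 : rea = d.getD "REASON" "") :
    pvAStep (dec, lab, rea) line =
      (PySem.Str.upper ((pvBStep d line).getD "DECISION" ""),
       PySem.Str.upper ((pvBStep d line).getD "LABEL" ""),
       (pvBStep d line).getD "REASON" "") := by
  have hcondD := pv_cond line "DECISION:" "DECISION" (by decide) (by decide)
  have hcondL := pv_cond line "LABEL:" "LABEL" (by decide) (by decide)
  have hcondR := pv_cond line "REASON:" "REASON" (by decide) (by decide)
  by_cases hcol : PySem.Str.isIn ":" line = true
  · by_cases hD : PySem.Str.upper (((PySem.Str.splitMax? line ":" 1).getD []).getD 0 "") = "DECISION"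
    · rw [pvAStep, if_pos (hcondD.mpr ⟨hcol, hD⟩)]
      rw [pvBStep, if_pos hcol]
      simp only [hD, PySem.Dict.getD_insert]
      simp [h2, h3]
    · by_cases hL : PySem.Str.upper (((PySem.Str.splitMax? line ":" 1).getD []).getD 0 "") = "LABEL"
      · rw [pvAStep, if_neg (fun h => hD (hcondD.mp h).2),
          if_pos (hcondL.mpr ⟨hcol, hL⟩)]
        rw [pvBStep, if_pos hcol]
        simp only [hL, PySem.Dict.getD_insert]
        simp [h1, h3]
      · by_cases hR : PySem.Str.upper (((PySem.Str.splitMax? line ":" 1).getD []).getD 0 "") = "REASON"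
        · rw [pvAStep, if_neg (fun h => hD (hcondD.mp h).2),
            if_neg (fun h => hL (hcondL.mp h).2),
            if_pos (hcondR.mpr ⟨hcol, hR⟩)]
          rw [pvBStep, if_pos hcol]
          simp only [hR, PySem.Dict.getD_insert]
          simp [h1, h2]
        · rw [pvAStep, if_neg (fun h => hD (hcondD.mp h).2),
            if_neg (fun h => hL (hcondL.mp h).2),
            if_neg (fun h => hR (hcondR.mp h).2)]
          rw [pvBStep, if_pos hcol]
          have hD' : ¬ (("DECISION" : String) = PySem.Str.upper (((PySem.Str.splitMax? line ":" 1).getD []).getD 0 "")) := fun h => hD h.symm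
          have hL' : ¬ (("LABEL" : String) = PySem.Str.upper (((PySem.Str.splitMax? line ":" 1).getD []).getD 0 "")) := fun h => hL h.symm
          have hR' : ¬ (("REASON" : String) = PySem.Str.upper (((PySem.Str.splitMax? line ":" 1).getD []).getD 0 "")) := fun h => hR h.symm
          simp only [PySem.Dict.getD_insert, if_neg hD', if_neg hL', if_neg hR']
          simp [h1, h2, h3]
  · rw [pvAStep,
      if_neg (fun h => hcol (hcondD.mp h).1),
      if_neg (fun h => hcol (hcondL.mp h).1),
      if_neg (fun h => hcol (hcondR.mp h).1)]
    rw [pvBStep, if_neg hcol]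
    simp [h1, h2, h3]

lemma pv_loop (ls : List String) (d : PySem.Dict String String) (dec lab rea : String)
    (h1 : dec = PySem.Str.upper (d.getD "DECISION" ""))
    (h2 : lab = PySem.Str.upper (d.getD "LABEL" ""))
    (h3 : rea = d.getD "REASON" "") :
    ls.foldl pvAStep (dec, lab, rea) =
      (PySem.Str.upper ((ls.foldl pvBStep d).getD "DECISION" ""),
       PySem.Str.upper ((ls.foldl pvBStep d).getD "LABEL" ""),
       (ls.foldl pvBStep d).getD "REASON" "") := by
  induction ls generalizing d dec lab rea with
  | nil => simp [h1, h2, h3]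
  | cons line rest ih =>
    simp only [List.foldl_cons]
    rw [pv_step d dec lab rea line h1 h2 h3]
    exact ih (pvBStep d line) _ _ _ rfl rfl rfl

lemma pv_finish (s : String) (d : PySem.Dict String String) :
    pvAFinish s (PySem.Str.upper (d.getD "DECISION" ""), PySem.Str.upper (d.getD "LABEL" ""), d.getD "REASON" "") = pvBFinish s d := rfl

-- ===== VERDICT (by name: the statement is the Claim_ definition above) =====
theorem parse_critic_py_spec : Claim_equal_parse_critic_py := by
  intro text _
  unfold Spec_parse_critic_py parse_critic_py parse_critic_py_alt
  rw [pv_loop (PySem.Str.splitlines (PySem.Str.strip (if text ≠ "" then text else "")))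
      PySem.Dict.empty "" "" "" (by decide) (by decide) (by decide)]
  exact pv_finish _ _
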